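-- pv_equiv track=rewrite | github.com/AntonioCampanozzi/MUTEN | df_manipulation.py | reduce_consecutive_duplicates
-- ===== SOURCE A (Python) =====
-- def reduce_consecutive_duplicates(actlst, timelst, reslst):
--     """
--     Riduce le occorrenze consecutive di un elemento in una lista a massimo 2.
--     :param actlst: Lista delle attività da filtrare
--     :param timelst: Lista di timestamp corrispondenti agli elementi
--     :param reslst: Lista delle risorse che svolgono le attività nel trace
--     :return: Lista filtrata e lista di timestamp corrispondenti
--     """
--     result = []
--     timestamps = []
--     resources= []
--     count = 0
--
--     for i in range(len(actlst)):
--         # If the current element is the same as the last one, increment the count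
--         if result and actlst[i] == result[-1] and reslst[i] == resources[-1]:
--             count += 1
--         else:
--             count = 1  # Reset the count if the element changes
--
--         # Add the element only if the count is 2 or less
--         if count <= 2:
--             result.append(actlst[i])
--             timestamps.append(timelst[i])
--             resources.append(reslst[i])
--
--     return result, timestamps, resources
-- ===== SOURCE B (Python) =====
-- def reduce_consecutive_duplicates(actlst, timelst, reslst):
--     """Two-stage re-implementation: first split the index range into maximal runs
--     of equal (activity, resource) pairs, then emit the first two indices of each run."""
--     n = len(actlst)
--     # stage 1: maximal runs of equal (activity, resource), as (start, length)
--     runs = []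
--     i = 0
--     while i < n:
--         j = i + 1
--         while j < n and (actlst[j], reslst[j]) == (actlst[i], reslst[i]):
--             j += 1
--         runs.append((i, j - i))
--         i = j
--     # stage 2: keep the first two positions of every run
--     keep = [k for start, length in runs for k in range(start, start + min(length, 2))]
--     return ([actlst[k] for k in keep],
--             [timelst[k] for k in keep],
--             [reslst[k] for k in keep])
-- ===== Notes on version B (the rewrite author's own statement) =====
-- stated objective: alternative
-- what changed: Replaces A's one-pass running counter (compared against the last appended activity/resource) by a two-stage decomposition: a first pass materializes the maximal runs of equal (activity,resource) pairs as (start,length) segments, a second pass flattens the first min(length,2) indices of each run and projects the three lists through them.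
import Mathlib
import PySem

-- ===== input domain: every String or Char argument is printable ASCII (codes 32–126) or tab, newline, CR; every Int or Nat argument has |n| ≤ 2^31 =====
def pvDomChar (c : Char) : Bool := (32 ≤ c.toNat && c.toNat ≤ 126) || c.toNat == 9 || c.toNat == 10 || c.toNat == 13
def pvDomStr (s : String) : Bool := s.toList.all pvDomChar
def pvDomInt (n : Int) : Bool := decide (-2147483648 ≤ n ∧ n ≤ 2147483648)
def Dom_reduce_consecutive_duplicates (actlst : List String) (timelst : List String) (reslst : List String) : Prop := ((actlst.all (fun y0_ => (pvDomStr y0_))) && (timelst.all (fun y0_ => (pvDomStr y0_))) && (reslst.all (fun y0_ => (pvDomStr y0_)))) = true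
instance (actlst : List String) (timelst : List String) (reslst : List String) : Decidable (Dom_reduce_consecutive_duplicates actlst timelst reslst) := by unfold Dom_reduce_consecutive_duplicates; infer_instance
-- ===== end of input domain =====

-- B replaces A's one-pass running counter (compared against the last appended activity/resource)
-- by a two-stage decomposition: first materialize the maximal runs of equal (activity,resource)
-- pairs as (start,length) segments, then emit the first min(length,2) indices of each run and
-- project the three lists through them; same O(n) cost, different algorithmic decomposition.

-- ===== PORT A =====
-- loop body of A; inside Pre_ every index read is in range, so `getD ""` is exact
def pvStepA (a t r : List String) (s : List String × List String × List String × Nat) (i : Nat) :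
    List String × List String × List String × Nat :=
  let result := s.1
  let timestamps := s.2.1
  let resources := s.2.2.1
  let count := s.2.2.2
  let count := if result ≠ [] ∧ (a[i]?).getD "" = result.getLast?.getD ""
                  ∧ (r[i]?).getD "" = resources.getLast?.getD "" then count + 1 else 1
  if count ≤ 2 then
    (result ++ [(a[i]?).getD ""], timestamps ++ [(t[i]?).getD ""], resources ++ [(r[i]?).getD ""], count)
  else (result, timestamps, resources, count)

def reduce_consecutive_duplicates (actlst : List String) (timelst : List String) (reslst : List String) : List String × List String × List String :=
  let s := (List.range actlst.length).foldl (pvStepA actlst timelst reslst) ([], [], [], 0)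
  (s.1, s.2.1, s.2.2.1)

-- ===== PORT B =====
-- the (activity, resource) key Source B compares at index i (in range inside Pre_)
def pvKey (a r : List String) (i : Nat) : String × String := ((a[i]?).getD "", (r[i]?).getD "")

-- Source B's inner while loop: advance j while (actlst[j], reslst[j]) equals the run key k
def pvRunEnd (a r : List String) (k : String × String) (j : Nat) : Nat :=
  if j < a.length ∧ pvKey a r j = k then pvRunEnd a r k (j + 1) else j
termination_by a.length - j
decreasing_by omega

-- needed by pvRuns' termination proof
theorem pvRunEnd_ge (a r : List String) (k : String × String) (j : Nat) : j ≤ pvRunEnd a r k j := by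
  unfold pvRunEnd
  split
  · have := pvRunEnd_ge a r k (j + 1)
    omega
  · omega
termination_by a.length - j
decreasing_by omega

-- Source B's outer while loop: the maximal runs of equal keys, as (start, length)
def pvRuns (a r : List String) (i : Nat) : List (Nat × Nat) :=
  if h : i < a.length then
    let e := pvRunEnd a r (pvKey a r i) (i + 1)
    (i, e - i) :: pvRuns a r e
  else []
termination_by a.length - i
decreasing_by
  have := pvRunEnd_ge a r (pvKey a r i) (i + 1)
  omega

def reduce_consecutive_duplicates_alt (actlst : List String) (timelst : List String) (reslst : List String) : List String × List String × List String :=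
  let keep := (pvRuns actlst reslst 0).flatMap (fun p => List.range' p.1 (min p.2 2))
  (keep.map (fun k => (actlst[k]?).getD ""),
   keep.map (fun k => (timelst[k]?).getD ""),
   keep.map (fun k => (reslst[k]?).getD ""))

-- ===== PRECONDITION & SPEC =====
-- Pre_ conservatively requires timelst and reslst at least as long as actlst: a shorter reslst
-- always makes A raise IndexError, and a shorter timelst makes it raise whenever a kept index
-- reaches past it (A reads timelst only at kept indices, so it accidentally returns when every
-- out-of-range index is a skipped third-or-later duplicate; B reads the same indices and agrees there).
def Pre_reduce_consecutive_duplicates (actlst : List String) (timelst : List String) (reslst : List String) : Prop :=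
  actlst.length ≤ timelst.length ∧ actlst.length ≤ reslst.length
instance (actlst : List String) (timelst : List String) (reslst : List String) : Decidable (Pre_reduce_consecutive_duplicates actlst timelst reslst) := by unfold Pre_reduce_consecutive_duplicates; infer_instance

def pvWitness_reduce_consecutive_duplicates : List String × List String × List String :=
  (["a", "a", "a", "b"], ["1", "2", "3", "4"], ["x", "x", "x", "y"])

def Spec_reduce_consecutive_duplicates (actlst : List String) (timelst : List String) (reslst : List String) (out : List String × List String × List String) : Prop := out = reduce_consecutive_duplicates_alt actlst timelst reslst
instance (actlst : List String) (timelst : List String) (reslst : List String) (out : List String × List String × List String) : Decidable (Spec_reduce_consecutive_duplicates actlst timelst reslst out) := by unfold Spec_reduce_consecutive_duplicates; infer_instance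

-- ===== CLAIM (what is proved, stated in full; the proofs are below) =====
def Claim_equal_reduce_consecutive_duplicates : Prop := ∀ (actlst : List String) (timelst : List String) (reslst : List String), Dom_reduce_consecutive_duplicates actlst timelst reslst → Pre_reduce_consecutive_duplicates actlst timelst reslst → Spec_reduce_consecutive_duplicates actlst timelst reslst (reduce_consecutive_duplicates actlst timelst reslst)

-- ===== LEMMAS AND PROOFS =====

-- proof-side characterization: index i is kept iff it is the first or second index of its run
def pvKeep (a r : List String) (i : Nat) : Bool :=
  i == 0 || decide (pvKey a r i ≠ pvKey a r (i-1))
    || i == 1 || decide (pvKey a r (i-1) ≠ pvKey a r (i-2))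

-- length of the run of equal keys ending at index i (A's `count` after processing i)
def pvRl (a r : List String) : Nat → Nat
  | 0 => 1
  | i + 1 => if pvKey a r (i + 1) = pvKey a r i then pvRl a r i + 1 else 1

theorem pvRl_pos (a r : List String) (i : Nat) : 1 ≤ pvRl a r i := by
  cases i with
  | zero => simp [pvRl]
  | succ j => simp only [pvRl]; split <;> omega

theorem pvKeep_iff4 (a r : List String) (i : Nat) :
    pvKeep a r i = true ↔
      (i = 0 ∨ pvKey a r i ≠ pvKey a r (i - 1) ∨ i = 1 ∨ pvKey a r (i - 1) ≠ pvKey a r (i - 2)) := by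
  simp [pvKeep]
  tauto

theorem pvRl_eq_one_iff (a r : List String) (i : Nat) :
    pvRl a r i = 1 ↔ (i = 0 ∨ pvKey a r i ≠ pvKey a r (i - 1)) := by
  cases i with
  | zero => simp [pvRl]
  | succ j =>
    simp only [pvRl, Nat.add_sub_cancel]
    split
    · rename_i h
      have := pvRl_pos a r j
      constructor
      · intro hc; omega
      · rintro (hc | hc)
        · omega
        · exact absurd h hc
    · rename_i h
      exact iff_of_true rfl (Or.inr h)

theorem pvKeep_iff (a r : List String) (i : Nat) :
    pvKeep a r i = true ↔ (i = 0 ∨ pvKey a r i ≠ pvKey a r (i - 1) ∨ pvRl a r (i - 1) = 1) := by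
  rw [pvKeep_iff4, pvRl_eq_one_iff]
  have h12 : i - 1 - 1 = i - 2 := by omega
  rw [h12]
  constructor
  · rintro (h | h | h | h)
    · exact Or.inl h
    · exact Or.inr (Or.inl h)
    · subst h; exact Or.inr (Or.inr (Or.inl rfl))
    · exact Or.inr (Or.inr (Or.inr h))
  · rintro (h | h | h | h)
    · exact Or.inl h
    · exact Or.inr (Or.inl h)
    · have : i = 0 ∨ i = 1 := by omega
      rcases this with h' | h'
      · exact Or.inl h'
      · exact Or.inr (Or.inr (Or.inl h'))
    · exact Or.inr (Or.inr (Or.inr h))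

-- keep i = false forces key i = key (i-1) and i ≠ 0
theorem pvKeep_false_key (a r : List String) (i : Nat) (h : pvKeep a r i = false) :
    pvKey a r i = pvKey a r (i - 1) ∧ i ≠ 0 := by
  have hi := pvKeep_iff a r i
  rw [h] at hi
  simp only [Bool.false_eq_true, false_iff, not_or, not_not] at hi
  exact ⟨hi.2.1, hi.1⟩

-- last key of the kept prefix of indices
theorem pvLast_key (a r : List String) :
    ∀ i : Nat, i ≠ 0 →
      (((List.range i).filter (pvKeep a r)).map (pvKey a r)).getLast? = some (pvKey a r (i - 1)) := by
  intro i
  induction i with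
  | zero => intro h; exact absurd rfl h
  | succ j ih =>
    intro _
    rw [List.range_succ, List.filter_append]
    by_cases hk : pvKeep a r j = true
    · simp [hk]
    · have hk' : pvKeep a r j = false := by simpa using hk
      have hkey := pvKeep_false_key a r j hk'
      rw [show List.filter (pvKeep a r) [j] = [] by simp [hk'], List.append_nil,
        Nat.add_sub_cancel, ih hkey.2, hkey.1]

-- A's loop state after i iterations, described by the kept-index filter
theorem pvInvA (a t r : List String) :
    ∀ i : Nat,
      (List.range i).foldl (pvStepA a t r) ([], [], [], 0) =
        (((List.range i).filter (pvKeep a r)).map (fun j => (a[j]?).getD ""),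
         ((List.range i).filter (pvKeep a r)).map (fun j => (t[j]?).getD ""),
         ((List.range i).filter (pvKeep a r)).map (fun j => (r[j]?).getD ""),
         if i = 0 then 0 else pvRl a r (i - 1)) := by
  intro i
  induction i with
  | zero => simp
  | succ j ih =>
    rw [List.range_succ, List.foldl_append, ih, List.filter_append]
    simp only [List.foldl_cons, List.foldl_nil, Nat.succ_ne_zero, if_false, Nat.add_sub_cancel]
    by_cases hj : j = 0
    · subst hj
      simp [pvStepA, pvKeep, pvRl]
    · rw [if_neg hj]
      have h0 : (0 : Nat) ∈ (List.range j).filter (pvKeep a r) :=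
        List.mem_filter.mpr ⟨List.mem_range.mpr (by omega), by simp [pvKeep]⟩
      have hFne : (List.range j).filter (pvKeep a r) ≠ [] := List.ne_nil_of_mem h0
      have hKa :
          (((List.range j).filter (pvKeep a r)).map (fun x => (a[x]?).getD "")).getLast?
            = some ((a[j-1]?).getD "") := by
        have h := pvLast_key a r j hj
        have h2 := congrArg (Option.map Prod.fst) h
        rw [← List.getLast?_map] at h2
        simpa [List.map_map, pvKey, Function.comp] using h2
      have hKr :
          (((List.range j).filter (pvKeep a r)).map (fun x => (r[x]?).getD "")).getLast?
            = some ((r[j-1]?).getD "") := by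
        have h := pvLast_key a r j hj
        have h2 := congrArg (Option.map Prod.snd) h
        rw [← List.getLast?_map] at h2
        simpa [List.map_map, pvKey, Function.comp] using h2
      have hmapne :
          ((List.range j).filter (pvKeep a r)).map (fun x => (a[x]?).getD "") ≠ [] := by
        simp [List.map_eq_nil_iff, hFne]
      have hcond :
          ((((List.range j).filter (pvKeep a r)).map (fun x => (a[x]?).getD "")) ≠ [] ∧
            (a[j]?).getD "" = ((((List.range j).filter (pvKeep a r)).map (fun x => (a[x]?).getD ""))).getLast?.getD "" ∧
            (r[j]?).getD "" = ((((List.range j).filter (pvKeep a r)).map (fun x => (r[x]?).getD ""))).getLast?.getD "")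
          ↔ pvKey a r j = pvKey a r (j - 1) := by
        rw [hKa, hKr]
        simp only [Option.getD_some, pvKey, Prod.mk.injEq]
        constructor
        · rintro ⟨_, h1, h2⟩; exact ⟨h1, h2⟩
        · rintro ⟨h1, h2⟩; exact ⟨hmapne, h1, h2⟩
      have hrlj : pvRl a r j =
          if pvKey a r j = pvKey a r (j - 1) then pvRl a r (j - 1) + 1 else 1 := by
        have hj1 : j = (j - 1) + 1 := by omega
        conv_lhs => rw [hj1]
        rw [pvRl, ← hj1]
      simp only [pvStepA]
      by_cases hkey : pvKey a r j = pvKey a r (j - 1)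
      · rw [if_pos (hcond.mpr hkey)]
        rw [hrlj, if_pos hkey]
        by_cases hone : pvRl a r (j - 1) = 1
        · have hkeep : pvKeep a r j = true := (pvKeep_iff a r j).mpr (Or.inr (Or.inr hone))
          rw [if_pos (by omega : pvRl a r (j-1) + 1 ≤ 2)]
          simp [hkeep, hone]
        · have hkeep : pvKeep a r j = false := by
            rcases Bool.eq_false_or_eq_true (pvKeep a r j) with h | h
            swap
            · exact h
            rcases (pvKeep_iff a r j).mp h with h' | h' | h'
            · exact absurd h' hj
            · exact absurd hkey h'
            · exact absurd h' hone
          have := pvRl_pos a r (j - 1)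
          rw [if_neg (by omega : ¬ (pvRl a r (j-1) + 1 ≤ 2))]
          simp [hkeep]
      · rw [if_neg (fun hc => hkey (hcond.mp hc))]
        have hkeep : pvKeep a r j = true := (pvKeep_iff a r j).mpr (Or.inr (Or.inl hkey))
        rw [if_pos (by omega : (1:Nat) ≤ 2)]
        rw [hrlj, if_neg hkey]
        simp [hkeep]

-- ---- B-side: the flattened runs are exactly the kept-index filter ----

theorem pvRunEnd_le (a r : List String) (k : String × String) (j : Nat) (h : j ≤ a.length) :
    pvRunEnd a r k j ≤ a.length := by
  unfold pvRunEnd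
  split
  · rename_i hc
    exact pvRunEnd_le a r k (j + 1) (by omega)
  · exact h
termination_by a.length - j
decreasing_by omega

theorem pvRunEnd_key (a r : List String) (k : String × String) (j m : Nat)
    (h1 : j ≤ m) (h2 : m < pvRunEnd a r k j) : pvKey a r m = k := by
  unfold pvRunEnd at h2
  split at h2
  · rename_i hc
    by_cases hm : m = j
    · subst hm; exact hc.2
    · exact pvRunEnd_key a r k (j + 1) m (by omega) h2
  · omega
termination_by a.length - j
decreasing_by rename_i hc _; omega

theorem pvRunEnd_stop (a r : List String) (k : String × String) (j : Nat) :
    ¬ (pvRunEnd a r k j < a.length ∧ pvKey a r (pvRunEnd a r k j) = k) := by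
  unfold pvRunEnd
  split
  · exact pvRunEnd_stop a r k (j + 1)
  · rename_i hc
    exact hc
termination_by a.length - j
decreasing_by rename_i hc; omega

-- inside a run, every index past the second is dropped
theorem pvKeep_false_inside (a r : List String) (i m : Nat)
    (hm : i + 2 ≤ m)
    (hall : ∀ x, i ≤ x → x ≤ m → pvKey a r x = pvKey a r i) :
    pvKeep a r m = false := by
  cases hb : pvKeep a r m with
  | false => rfl
  | true =>
  exfalso
  rcases (pvKeep_iff a r m).mp hb with h' | h' | h'
  · omega
  · exact h' (by rw [hall m (by omega) le_rfl, hall (m-1) (by omega) (by omega)])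
  · rcases (pvRl_eq_one_iff a r (m-1)).mp h' with h'' | h''
    · omega
    · have e1 : pvKey a r (m-1) = pvKey a r i := hall (m-1) (by omega) (by omega)
      have e2 : pvKey a r (m-1-1) = pvKey a r i := hall (m-1-1) (by omega) (by omega)
      exact h'' (e1.trans e2.symm)

theorem pvRange'_filter_eq (a r : List String) (i len : Nat)
    (hstart : i = 0 ∨ pvKey a r i ≠ pvKey a r (i - 1))
    (hall : ∀ x, i ≤ x → x < i + len → pvKey a r x = pvKey a r i) :
    (List.range' i len).filter (pvKeep a r) = List.range' i (min len 2) := by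
  have hki : pvKeep a r i = true := by
    rcases hstart with h | h
    · subst h; simp [pvKeep]
    · exact (pvKeep_iff a r i).mpr (Or.inr (Or.inl h))
  match len with
  | 0 => simp
  | 1 => simp [List.range', hki]
  | Nat.succ (Nat.succ len') =>
    have hk1 : pvKeep a r (i + 1) = true := by
      apply (pvKeep_iff a r (i+1)).mpr
      apply Or.inr (Or.inr _)
      rw [Nat.add_sub_cancel]
      exact (pvRl_eq_one_iff a r i).mpr hstart
    have hrest : (List.range' (i + 2) len').filter (pvKeep a r) = [] := by
      apply List.filter_eq_nil_iff.mpr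
      intro m hm
      rw [List.mem_range'] at hm
      obtain ⟨d, hd, hmd⟩ := hm
      simp only [Bool.not_eq_true]
      apply pvKeep_false_inside a r i m (by omega)
      intro x hx1 hx2
      exact hall x hx1 (by omega)
    show (List.range' i (len' + 1 + 1)).filter (pvKeep a r) = _
    rw [List.range'_succ, List.range'_succ, List.filter_cons_of_pos hki,
      List.filter_cons_of_pos hk1]
    have : i + 1 + 1 = i + 2 := by omega
    rw [this, hrest]
    simp [List.range'_succ]

theorem pvRunsFlat (a r : List String) :
    ∀ i, i ≤ a.length → (i < a.length → (i = 0 ∨ pvKey a r i ≠ pvKey a r (i - 1))) →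
      (pvRuns a r i).flatMap (fun p => List.range' p.1 (min p.2 2)) =
        (List.range' i (a.length - i)).filter (pvKeep a r) := by
  intro i
  induction hι : a.length - i using Nat.strong_induction_on generalizing i with
  | _ n ih =>
    intro hle hstart
    subst hι
    unfold pvRuns
    by_cases hi : i < a.length
    · rw [dif_pos hi]
      set e := pvRunEnd a r (pvKey a r i) (i + 1) with he
      have hge : i + 1 ≤ e := pvRunEnd_ge a r (pvKey a r i) (i + 1)
      have hlen : e ≤ a.length := pvRunEnd_le a r (pvKey a r i) (i + 1) (by omega)
      have hkeys : ∀ x, i ≤ x → x < e → pvKey a r x = pvKey a r i := by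
        intro x hx1 hx2
        by_cases hxi : x = i
        · subst hxi; rfl
        · exact pvRunEnd_key a r (pvKey a r i) (i + 1) x (by omega) hx2
      have hstop := pvRunEnd_stop a r (pvKey a r i) (i + 1)
      rw [← he] at hstop
      have hestart : e < a.length → (e = 0 ∨ pvKey a r e ≠ pvKey a r (e - 1)) := by
        intro hlt
        right
        intro hc
        apply hstop
        refine ⟨hlt, ?_⟩
        rw [hc, hkeys (e - 1) (by omega) (by omega)]
      have hsplit : List.range' i (a.length - i) =
          List.range' i (e - i) ++ List.range' e (a.length - e) := by
        have h1 : List.range' i (e - i) ++ List.range' (i + (e - i)) (a.length - e) =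
            List.range' i ((e - i) + (a.length - e)) := List.range'_append_1
        rw [show i + (e - i) = e by omega] at h1
        rw [show a.length - i = (e - i) + (a.length - e) by omega, h1]
      rw [List.flatMap_cons, hsplit, List.filter_append]
      congr 1
      · exact (pvRange'_filter_eq a r i (e - i) (hstart hi)
          (fun x hx1 hx2 => hkeys x hx1 (by omega))).symm
      · exact ih (a.length - e) (by omega) e rfl hlen hestart
    · rw [dif_neg hi]
      have : a.length - i = 0 := by omega
      rw [this]
      simp
theorem reduce_equal (a t r : List String) :
    reduce_consecutive_duplicates a t r = reduce_consecutive_duplicates_alt a t r := by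
  unfold reduce_consecutive_duplicates reduce_consecutive_duplicates_alt
  rw [pvInvA]
  rw [pvRunsFlat a r 0 (by omega) (fun _ => Or.inl rfl)]
  rw [Nat.sub_zero, ← List.range_eq_range']

-- ===== VERDICT (by name: the statement is the Claim_ definition above) =====
theorem reduce_consecutive_duplicates_spec : Claim_equal_reduce_consecutive_duplicates := by
  intro a t r _ _
  unfold Spec_reduce_consecutive_duplicates
  exact reduce_equal a t r
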